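-- pv_equiv track=rewrite | github.com/GustavoSalata/PermListGen | PermListGenv2.py | tem_tres_consecutivos_iguais
-- ===== SOURCE A (Python) =====
-- def tem_tres_consecutivos_iguais(word):
--     consecutivos = 1
--     for i in range(1, len(word)):
--         if word[i] == word[i-1]:
--             consecutivos += 1
--             if consecutivos == 3:
--                 return True
--         else:
--             consecutivos = 1
--     return False
-- ===== SOURCE B (Python) =====
-- def tem_tres_consecutivos_iguais(word):
--     return any(3 * c in word for c in set(word))
-- ===== Notes on version B (the rewrite author's own statement) =====
-- stated objective: alternative
-- what changed: Replaced the single pass with a manually reset run counter by a per-character substring search: for each distinct character c of word, test whether the string c*3 occurs as a substring.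
import Mathlib
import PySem

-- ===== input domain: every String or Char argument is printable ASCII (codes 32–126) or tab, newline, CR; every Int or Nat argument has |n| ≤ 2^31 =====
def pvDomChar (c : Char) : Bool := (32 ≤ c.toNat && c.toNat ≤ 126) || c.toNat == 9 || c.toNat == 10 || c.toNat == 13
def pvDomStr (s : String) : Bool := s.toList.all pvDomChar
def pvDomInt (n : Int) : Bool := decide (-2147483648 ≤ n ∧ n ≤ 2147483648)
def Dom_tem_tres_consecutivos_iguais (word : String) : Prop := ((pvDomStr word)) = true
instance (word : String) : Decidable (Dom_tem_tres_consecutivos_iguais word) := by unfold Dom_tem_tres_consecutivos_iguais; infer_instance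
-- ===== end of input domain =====

-- B replaces A's single pass with a manually reset run counter by a per-character
-- substring search: for each distinct character c of word, it tests whether c*3
-- occurs as a substring (alternative algorithm, same big-O in the alphabet-bounded case).

-- ===== PORT A =====
-- the for-loop over range(1, len(word)), carrying the 'consecutivos' counter; the early
-- 'return True' becomes the 'true' branch that stops the recursion over the index list
def pvALoop (cs : List Char) : List Int → Int → Bool
  | [], _ => false
  | i :: is, consecutivos =>
    if PySem.List.pyGet? cs i == PySem.List.pyGet? cs (i - 1) then
      if consecutivos + 1 == 3 then true
      else pvALoop cs is (consecutivos + 1)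
    else pvALoop cs is 1

def tem_tres_consecutivos_iguais (word : String) : Bool :=
  pvALoop word.toList (PySem.List.pyRange 1 (word.toList.length : Int) 1) 1

-- ===== PORT B =====
-- any(3 * c in word for c in set(word)): 3 * c is the three-element list [c, c, c]
-- (List.replicate 3 c), 'in word' is PySem.Chars.isIn, set(word) is PySem.Set.ofList
def tem_tres_consecutivos_iguais_alt (word : String) : Bool :=
  (PySem.Set.ofList word.toList).any (fun c => PySem.Chars.isIn (List.replicate 3 c) word.toList)

-- ===== PRECONDITION & SPEC =====
def Spec_tem_tres_consecutivos_iguais (word : String) (out : Bool) : Prop := out = tem_tres_consecutivos_iguais_alt word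
instance (word : String) (out : Bool) : Decidable (Spec_tem_tres_consecutivos_iguais word out) := by unfold Spec_tem_tres_consecutivos_iguais; infer_instance

-- ===== CLAIM (what is proved, stated in full; the proofs are below) =====
def Claim_equal_tem_tres_consecutivos_iguais : Prop := ∀ (word : String), Dom_tem_tres_consecutivos_iguais word → Spec_tem_tres_consecutivos_iguais word (tem_tres_consecutivos_iguais word)

-- ===== LEMMAS AND PROOFS =====

-- reference predicate both ports are reduced to: some three adjacent characters are equal
def pvHasTriple : List Char → Bool
  | a :: b :: c :: rest => (a == b && b == c) || pvHasTriple (b :: c :: rest)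
  | _ => false

-- abstract form of A's loop on the suffix after the current position
def pvLoopL : Char → List Char → Int → Bool
  | _, [], _ => false
  | prev, x :: xs, c =>
    if x = prev then (if c + 1 = 3 then true else pvLoopL x xs (c + 1))
    else pvLoopL x xs 1

theorem pvALoop_eq (rest : List Char) : ∀ (pre : List Char) (prev : Char) (c : Int),
    pvALoop (pre ++ prev :: rest) (PySem.List.pyRange ((pre.length : Int) + 1) ((pre.length : Int) + 1 + rest.length) 1) c
      = pvLoopL prev rest c := by
  induction rest with
  | nil =>
    intro pre prev c
    rw [PySem.List.pyRange_one_eq_nil (by simp)]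
    rfl
  | cons x rest ih =>
    intro pre prev c
    rw [PySem.List.pyRange_one_cons (by simp only [List.length_cons]; push_cast; omega)]
    have h1 : PySem.List.pyGet? (pre ++ prev :: x :: rest) ((pre.length : Int) + 1) = some x := by
      have h : ((pre.length : Int) + 1) = ((pre.length + 1 : Nat) : Int) := by push_cast; ring
      rw [h, PySem.List.pyGet?_natCast]
      simp
    have h0 : PySem.List.pyGet? (pre ++ prev :: x :: rest) ((pre.length : Int) + 1 - 1) = some prev := by
      have h : ((pre.length : Int) + 1 - 1) = ((pre.length : Nat) : Int) := by ring
      rw [h, PySem.List.pyGet?_natCast]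
      simp
    rw [pvALoop, h1, h0]
    have hpre : pre ++ prev :: x :: rest = (pre ++ [prev]) ++ x :: rest := by simp
    have ihx : ∀ c', pvALoop (pre ++ prev :: x :: rest)
        (PySem.List.pyRange ((pre.length : Int) + 1 + 1) ((pre.length : Int) + 1 + 1 + rest.length) 1) c'
        = pvLoopL x rest c' := by
      intro c'
      have := ih (pre ++ [prev]) x c'
      rw [← hpre] at this
      simp only [List.length_append, List.length_cons, List.length_nil] at this
      push_cast at this
      exact this
    have hb : ((pre.length : Int) + 1 + ((x :: rest).length : Int))
        = ((pre.length : Int) + 1 + 1 + (rest.length : Int)) := by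
      simp only [List.length_cons]; push_cast; ring
    by_cases hx : x = prev
    · have hbeq : (some x == some prev) = true := by simp [hx]
      rw [hbeq, if_pos rfl]
      by_cases hc : c + 1 = 3
      · have h3 : (c + 1 == 3) = true := by simpa using hc
        rw [h3, if_pos rfl]
        simp [pvLoopL, hx, hc]
      · have h3 : (c + 1 == 3) = false := by simpa using hc
        rw [h3]
        simp only [Bool.false_eq_true, if_false]
        rw [hb, ihx (c + 1)]
        simp [pvLoopL, hx, hc]
    · have hbeq : (some x == some prev) = false := by simp [hx]
      rw [hbeq]
      simp only [Bool.false_eq_true, if_false]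
      rw [hb, ihx 1]
      simp [pvLoopL, hx]

-- A's loop counter states c = 1 / c = 2, read off against the triple predicate
theorem pvLoopL_hasTriple (xs : List Char) : ∀ (prev : Char),
    pvLoopL prev xs 1 = pvHasTriple (prev :: xs)
      ∧ pvLoopL prev xs 2 = pvHasTriple (prev :: prev :: xs) := by
  induction xs with
  | nil =>
    intro prev
    constructor <;> simp [pvLoopL, pvHasTriple]
  | cons x xs ih =>
    intro prev
    constructor
    · by_cases hx : x = prev
      · subst hx
        have h1 : pvLoopL x (x :: xs) 1 = pvLoopL x xs 2 := by norm_num [pvLoopL]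
        rw [h1, (ih x).2]
      · have h1 : pvLoopL prev (x :: xs) 1 = pvLoopL x xs 1 := by simp [pvLoopL, hx]
        have hpx : (prev == x) = false := by simp [Ne.symm hx]
        rw [h1, (ih x).1]
        cases xs with
        | nil => simp [pvHasTriple]
        | cons y ys => simp [pvHasTriple, hpx]
    · by_cases hx : x = prev
      · subst hx
        have h2 : pvLoopL x (x :: xs) 2 = true := by norm_num [pvLoopL]
        rw [h2]
        simp [pvHasTriple]
      · have h2 : pvLoopL prev (x :: xs) 2 = pvLoopL x xs 1 := by simp [pvLoopL, hx]
        have hpx : (prev == x) = false := by simp [Ne.symm hx]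
        rw [h2, (ih x).1]
        cases xs with
        | nil => simp [pvHasTriple, hpx]
        | cons y ys => simp [pvHasTriple, hpx]

theorem pvHasTriple_cons_of (a : Char) (l : List Char) (h : pvHasTriple l = true) :
    pvHasTriple (a :: l) = true := by
  match l with
  | [] => simp [pvHasTriple] at h
  | [_] => simp [pvHasTriple] at h
  | b :: c :: rest =>
    simp only [pvHasTriple, Bool.or_eq_true]
    right
    exact h

theorem pvHasTriple_infix : ∀ (l : List Char), pvHasTriple l = true → ∃ c, [c, c, c] <:+: l
  | a :: b :: c :: rest, h => by
    simp only [pvHasTriple, Bool.or_eq_true, Bool.and_eq_true, beq_iff_eq] at h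
    rcases h with ⟨hab, hbc⟩ | h
    · subst hab
      subst hbc
      exact ⟨a, [], rest, by simp⟩
    · obtain ⟨x, hx⟩ := pvHasTriple_infix (b :: c :: rest) h
      exact ⟨x, List.infix_cons hx⟩

theorem pvInfix_hasTriple : ∀ (l : List Char) (c : Char), [c, c, c] <:+: l → pvHasTriple l = true
  | [], _, h => by simp at h
  | a :: t, c, h => by
    rcases List.infix_cons_iff.mp h with hpre | hinf
    · obtain ⟨suf, hsuf⟩ := hpre
      simp only [List.cons_append, List.nil_append, List.cons.injEq] at hsuf
      obtain ⟨rfl, rfl⟩ := hsuf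
      simp [pvHasTriple]
    · exact pvHasTriple_cons_of a t (pvInfix_hasTriple t c hinf)

theorem pvAlt_eq_hasTriple (l : List Char) :
    (PySem.Set.ofList l).any (fun c => PySem.Chars.isIn (List.replicate 3 c) l) = pvHasTriple l := by
  have hrep : ∀ c : Char, List.replicate 3 c = [c, c, c] := fun _ => rfl
  rw [Bool.eq_iff_iff, List.any_eq_true]
  constructor
  · rintro ⟨c, _, hin⟩
    rw [hrep] at hin
    exact pvInfix_hasTriple l c ((PySem.Chars.isIn_iff_infix _ _).mp hin)
  · intro h
    obtain ⟨c, hinf⟩ := pvHasTriple_infix l h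
    refine ⟨c, ?_, by rw [hrep]; exact (PySem.Chars.isIn_iff_infix _ _).mpr hinf⟩
    rw [PySem.Set.mem_ofList]
    exact hinf.subset (by simp)

-- ===== VERDICT (by name: the statement is the Claim_ definition above) =====
theorem tem_tres_consecutivos_iguais_spec : Claim_equal_tem_tres_consecutivos_iguais := by
  intro word _
  show tem_tres_consecutivos_iguais word = tem_tres_consecutivos_iguais_alt word
  unfold tem_tres_consecutivos_iguais tem_tres_consecutivos_iguais_alt
  rw [pvAlt_eq_hasTriple]
  cases h : word.toList with
  | nil =>
    rw [show ((([] : List Char).length : Int)) = 0 by simp]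
    rw [PySem.List.pyRange_one_eq_nil (by norm_num)]
    simp [pvALoop, pvHasTriple]
  | cons x xs =>
    have hA := pvALoop_eq xs [] x 1
    simp only [List.nil_append, List.length_nil, Nat.cast_zero, zero_add] at hA
    rw [show (((x :: xs).length : Nat) : Int) = 1 + (xs.length : Int) by
      simp only [List.length_cons]; push_cast; ring]
    rw [hA, (pvLoopL_hasTriple xs x).1]
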